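-- pv_equiv track=rewrite | github.com/ArshCipher/SIH | populate_real_medical_data.py | _categorize_disease
-- ===== SOURCE A (Python) =====
-- def _categorize_disease(disease_name: str) -> str:
--     """Categorize disease based on name"""
--     disease_lower = disease_name.lower()
--
--     if any(term in disease_lower for term in ['diabetes', 'thyroid', 'hormone']):
--         return 'Endocrine'
--     elif any(term in disease_lower for term in ['heart', 'cardio', 'hypertension', 'angina']):
--         return 'Cardiovascular'
--     elif any(term in disease_lower for term in ['lung', 'asthma', 'pneumonia', 'respiratory']):
--         return 'Respiratory'
--     elif any(term in disease_lower for term in ['cancer', 'tumor', 'carcinoma', 'leukemia']):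
--         return 'Oncology'
--     elif any(term in disease_lower for term in ['infection', 'bacterial', 'viral', 'fungal']):
--         return 'Infectious'
--     elif any(term in disease_lower for term in ['depression', 'anxiety', 'mental', 'psychiatric']):
--         return 'Mental Health'
--     elif any(term in disease_lower for term in ['arthritis', 'bone', 'joint', 'muscle']):
--         return 'Musculoskeletal'
--     else:
--         return 'General Medicine'
-- ===== SOURCE B (Python) =====
-- _CATEGORIES = ['Endocrine', 'Cardiovascular', 'Respiratory', 'Oncology',
--                'Infectious', 'Mental Health', 'Musculoskeletal', 'General Medicine']
--
-- _TERM_PRIORITY = {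
--     'diabetes': 0, 'thyroid': 0, 'hormone': 0,
--     'heart': 1, 'cardio': 1, 'hypertension': 1, 'angina': 1,
--     'lung': 2, 'asthma': 2, 'pneumonia': 2, 'respiratory': 2,
--     'cancer': 3, 'tumor': 3, 'carcinoma': 3, 'leukemia': 3,
--     'infection': 4, 'bacterial': 4, 'viral': 4, 'fungal': 4,
--     'depression': 5, 'anxiety': 5, 'mental': 5, 'psychiatric': 5,
--     'arthritis': 6, 'bone': 6, 'joint': 6, 'muscle': 6,
-- }
--
-- _LENGTHS = sorted({len(t) for t in _TERM_PRIORITY})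
--
--
-- def _categorize_disease(disease_name: str) -> str:
--     # Sliding-window scan: instead of searching the text once per keyword,
--     # walk the text once and look each window up in a keyword->priority dict,
--     # keeping the smallest (highest-priority) category index seen.
--     s = disease_name.lower()
--     best = 7
--     for i in range(len(s)):
--         for L in _LENGTHS:
--             p = _TERM_PRIORITY.get(s[i:i + L])
--             if p is not None and p < best:
--                 best = p
--     return _CATEGORIES[best]
-- ===== Notes on version B (the rewrite author's own statement) =====
-- stated objective: alternative
-- what changed: Instead of running a per-keyword substring search for each of the 27 keywords in branch order, B scans the lowercased text once with a sliding window, looks each window up in a keyword->priority dictionary, and keeps the smallest category index found.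
import Mathlib
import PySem

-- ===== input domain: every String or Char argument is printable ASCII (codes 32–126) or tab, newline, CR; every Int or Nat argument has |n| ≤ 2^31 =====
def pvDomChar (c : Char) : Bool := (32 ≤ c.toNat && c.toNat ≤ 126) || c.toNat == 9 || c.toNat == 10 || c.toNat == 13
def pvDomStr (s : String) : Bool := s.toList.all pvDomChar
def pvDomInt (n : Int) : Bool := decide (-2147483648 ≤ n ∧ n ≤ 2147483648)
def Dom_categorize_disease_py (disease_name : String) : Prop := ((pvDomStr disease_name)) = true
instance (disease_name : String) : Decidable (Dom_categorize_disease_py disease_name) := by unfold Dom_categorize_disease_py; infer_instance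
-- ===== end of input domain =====

-- B replaces A's per-keyword substring searches by a single sliding-window scan of the
-- lowercased text that looks each window up in a keyword->priority dictionary and keeps
-- the smallest category index (objective: alternative algorithm, same result).


-- ===== PORT A =====
def categorize_disease_py (disease_name : String) : String :=
  let disease_lower := PySem.Str.lower disease_name
  if ["diabetes", "thyroid", "hormone"].any (fun term => PySem.Str.isIn term disease_lower) then
    "Endocrine"
  else if ["heart", "cardio", "hypertension", "angina"].any (fun term => PySem.Str.isIn term disease_lower) then
    "Cardiovascular"
  else if ["lung", "asthma", "pneumonia", "respiratory"].any (fun term => PySem.Str.isIn term disease_lower) then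
    "Respiratory"
  else if ["cancer", "tumor", "carcinoma", "leukemia"].any (fun term => PySem.Str.isIn term disease_lower) then
    "Oncology"
  else if ["infection", "bacterial", "viral", "fungal"].any (fun term => PySem.Str.isIn term disease_lower) then
    "Infectious"
  else if ["depression", "anxiety", "mental", "psychiatric"].any (fun term => PySem.Str.isIn term disease_lower) then
    "Mental Health"
  else if ["arthritis", "bone", "joint", "muscle"].any (fun term => PySem.Str.isIn term disease_lower) then
    "Musculoskeletal"
  else
    "General Medicine"

-- ===== PORT B =====
-- module constant _CATEGORIES
def pvCategories : List String :=
  ["Endocrine", "Cardiovascular", "Respiratory", "Oncology",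
   "Infectious", "Mental Health", "Musculoskeletal", "General Medicine"]

-- module constant _TERM_PRIORITY (a dict: keyword -> category index)
def pvTermPriority : PySem.Dict String Nat := PySem.Dict.ofList
  [("diabetes", 0), ("thyroid", 0), ("hormone", 0),
   ("heart", 1), ("cardio", 1), ("hypertension", 1), ("angina", 1),
   ("lung", 2), ("asthma", 2), ("pneumonia", 2), ("respiratory", 2),
   ("cancer", 3), ("tumor", 3), ("carcinoma", 3), ("leukemia", 3),
   ("infection", 4), ("bacterial", 4), ("viral", 4), ("fungal", 4),
   ("depression", 5), ("anxiety", 5), ("mental", 5), ("psychiatric", 5),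
   ("arthritis", 6), ("bone", 6), ("joint", 6), ("muscle", 6)]

-- module constant _LENGTHS = sorted({len(t) for t in _TERM_PRIORITY})
def pvLengths : List Int :=
  PySem.List.sorted (PySem.Set.ofList ((PySem.Dict.keys pvTermPriority).map PySem.Str.len)) (fun x => x)

-- _TERM_PRIORITY.get(s[i:i+L])
def pvLookup (s : String) (i L : Int) : Option Nat :=
  PySem.Dict.get? pvTermPriority (PySem.Str.slice s (some i) (some (i + L)))

-- the double loop: best starts at 7 and is lowered to every priority found in a window
def pvBestOf (s : String) : Nat :=
  (PySem.List.pyRange 0 (PySem.Str.len s) 1).foldl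
    (fun best i => pvLengths.foldl
      (fun b L =>
        match pvLookup s i L with
        | some p => if p < b then p else b
        | none => b) best) 7

def categorize_disease_py_alt (disease_name : String) : String :=
  let s := PySem.Str.lower disease_name
  pvCategories.getD (pvBestOf s) "General Medicine"

-- ===== PRECONDITION & SPEC =====
def Spec_categorize_disease_py (disease_name : String) (out : String) : Prop := out = categorize_disease_py_alt disease_name
instance (disease_name : String) (out : String) : Decidable (Spec_categorize_disease_py disease_name out) := by unfold Spec_categorize_disease_py; infer_instance

-- ===== CLAIM (what is proved, stated in full; the proofs are below) =====
def Claim_equal_categorize_disease_py : Prop := ∀ (disease_name : String), Dom_categorize_disease_py disease_name → Spec_categorize_disease_py disease_name (categorize_disease_py disease_name)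

-- ===== LEMMAS AND PROOFS =====

-- the seven keyword groups, in A's branch order
def pvGroup : Nat → List String
  | 0 => ["diabetes", "thyroid", "hormone"]
  | 1 => ["heart", "cardio", "hypertension", "angina"]
  | 2 => ["lung", "asthma", "pneumonia", "respiratory"]
  | 3 => ["cancer", "tumor", "carcinoma", "leukemia"]
  | 4 => ["infection", "bacterial", "viral", "fungal"]
  | 5 => ["depression", "anxiety", "mental", "psychiatric"]
  | 6 => ["arthritis", "bone", "joint", "muscle"]
  | _ => []

def pvCond (low : String) (p : Nat) : Bool := (pvGroup p).any (fun t => PySem.Str.isIn t low)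

-- generic facts about the min-tracking fold step
theorem pvFold_le {α : Type} (g : α → Option Nat) (xs : List α) (b : Nat) :
    xs.foldl (fun b x => match g x with | some p => if p < b then p else b | none => b) b ≤ b := by
  induction xs generalizing b with
  | nil => simp
  | cons y ys ih =>
    simp only [List.foldl_cons]
    refine le_trans (ih _) ?_
    cases g y with
    | none => simp
    | some p => simp only; split <;> omega

theorem pvFold_le_of_mem {α : Type} (g : α → Option Nat)
    {x : α} {p : Nat} (hg : g x = some p) : ∀ (xs : List α), x ∈ xs → ∀ (b : Nat),
    xs.foldl (fun b x => match g x with | some p => if p < b then p else b | none => b) b ≤ p := by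
  intro xs
  induction xs with
  | nil => intro h; simp at h
  | cons y ys ih =>
    intro hx b
    simp only [List.foldl_cons]
    rcases List.mem_cons.mp hx with rfl | hx'
    · refine le_trans (pvFold_le _ _ _) ?_
      rw [hg]; simp only; split <;> omega
    · exact ih hx' _

theorem pvFold_cases {α : Type} (g : α → Option Nat) (xs : List α) (b : Nat) :
    xs.foldl (fun b x => match g x with | some p => if p < b then p else b | none => b) b = b ∨
    ∃ x ∈ xs, g x = some (xs.foldl (fun b x => match g x with | some p => if p < b then p else b | none => b) b) := by
  induction xs generalizing b with
  | nil => left; rfl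
  | cons y ys ih =>
    simp only [List.foldl_cons]
    rcases ih (match g y with | some p => if p < b then p else b | none => b) with h | ⟨x, hx, hg⟩
    · rw [h]
      cases hgy : g y with
      | none => left; rfl
      | some p =>
        simp only
        split
        · right; exact ⟨y, List.mem_cons_self .., hgy⟩
        · left; rfl
    · right; exact ⟨x, List.mem_cons_of_mem _ hx, hg⟩

-- a nested fold over two lists is a flat fold over the list of pairs
theorem pvFold_flat (f : Nat → Int × Int → Nat) (xs ys : List Int) (b : Nat) :
    xs.foldl (fun b i => ys.foldl (fun b L => f b (i, L)) b) b =
    (xs.flatMap (fun i => ys.map (fun L => (i, L)))).foldl f b := by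
  induction xs generalizing b with
  | nil => rfl
  | cons y t ih => simp only [List.foldl_cons, List.flatMap_cons, List.foldl_append, List.foldl_map, ih]

-- pvBestOf as a flat fold
theorem pvBestOf_eq (s : String) :
    pvBestOf s =
    ((PySem.List.pyRange 0 (PySem.Str.len s) 1).flatMap
        (fun i => pvLengths.map (fun L => (i, L)))).foldl
      (fun b x => match pvLookup s x.1 x.2 with | some p => if p < b then p else b | none => b) 7 := by
  unfold pvBestOf
  exact pvFold_flat
    (fun b x => match pvLookup s x.1 x.2 with | some p => if p < b then p else b | none => b) _ _ _

-- a keyword hit lowers best below that keyword's priority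
theorem pvHit (low t : String) (p : Nat)
    (ht : PySem.Dict.get? pvTermPriority t = some p)
    (hL : (t.toList.length : Int) ∈ pvLengths) (hne : t.toList ≠ [])
    (h : PySem.Str.isIn t low = true) : pvBestOf low ≤ p := by
  rw [PySem.Str.isIn_iff_infix] at h
  have h' : PySem.Chars.isIn t.toList low.toList = true :=
    (PySem.Chars.isIn_iff_infix _ _).mpr h
  obtain ⟨j, hj⟩ := (PySem.Chars.exists_prefix_drop_iff_isIn t.toList low.toList).mpr h'
  have hdne : low.toList.drop j ≠ [] := by
    intro hd
    rw [hd] at hj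
    exact hne (List.prefix_nil.mp hj)
  have hjlt : j < low.toList.length := by
    by_contra hge
    exact hdne (List.drop_eq_nil_of_le (by omega))
  have hwin : PySem.Str.slice low (some (j : Int)) (some ((j : Int) + (t.toList.length : Int))) = t := by
    apply String.toList_inj.mp
    have : (PySem.Str.slice low (some (j : Int)) (some ((j : Int) + (t.toList.length : Int)))).toList
        = PySem.List.slice low.toList (some (j : Int)) (some ((j : Int) + (t.toList.length : Int))) := by
      simp [pysem]
    rw [this, PySem.List.slice_natCast_add]
    exact (List.prefix_iff_eq_take.mp hj).symm
  rw [pvBestOf_eq]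
  have hg' : (fun x : Int × Int => pvLookup low x.1 x.2) ((j : Int), (t.toList.length : Int)) = some p := by
    simp only
    unfold pvLookup
    rw [hwin]
    exact ht
  have hx' : ((j : Int), (t.toList.length : Int)) ∈
      (PySem.List.pyRange 0 (PySem.Str.len low) 1).flatMap (fun i => pvLengths.map (fun L => (i, L))) := by
    rw [List.mem_flatMap]
    refine ⟨(j : Int), ?_, ?_⟩
    · rw [PySem.List.mem_pyRange_one]
      constructor
      · exact Int.natCast_nonneg j
      · rw [PySem.Str.len_eq]; exact_mod_cast hjlt
    · exact List.mem_map.mpr ⟨_, hL, rfl⟩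
  exact pvFold_le_of_mem (fun x : Int × Int => pvLookup low x.1 x.2) hg' _ hx' 7

-- every keyword of group p is in the dict with priority p, has its length in pvLengths, is nonempty
theorem pvGroup_facts : ∀ p < 7, ∀ t ∈ pvGroup p,
    PySem.Dict.get? pvTermPriority t = some p ∧ ((t.toList.length : Int)) ∈ pvLengths ∧ t.toList ≠ [] := by
  decide

-- a matched group bounds best
theorem pvBest_le (low : String) (p : Nat) (hp : p < 7) (hc : pvCond low p = true) :
    pvBestOf low ≤ p := by
  obtain ⟨t, htm, hin⟩ := List.any_eq_true.mp hc
  obtain ⟨h1, h2, h3⟩ := pvGroup_facts p hp t htm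
  exact pvHit low t p h1 h2 h3 hin

-- every dict item names a group member with the item's priority
theorem pvItems_facts : ∀ wp ∈ pvTermPriority.items, wp.2 < 7 ∧ wp.1 ∈ pvGroup wp.2 := by
  decide

-- best is 7, or best is a matched group's index
theorem pvBest_mem (low : String) :
    pvBestOf low = 7 ∨ (pvBestOf low < 7 ∧ pvCond low (pvBestOf low) = true) := by
  rw [pvBestOf_eq]
  rcases pvFold_cases (fun x => pvLookup low x.1 x.2)
      ((PySem.List.pyRange 0 (PySem.Str.len low) 1).flatMap
        (fun i => pvLengths.map (fun L => (i, L)))) 7 with h | ⟨x, hx, hg⟩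
  · left; exact h
  · right
    obtain ⟨i, hi, hmm⟩ := List.mem_flatMap.mp hx
    obtain ⟨L, hLm, rfl⟩ := List.mem_map.mp hmm
    have hi0 : (0 : Int) ≤ i := (PySem.List.mem_pyRange_one.mp hi).1
    have hL0 : (0 : Int) ≤ L := by
      have : ∀ L ∈ pvLengths, (0 : Int) ≤ L := by decide
      exact this L hLm
    set best := ((PySem.List.pyRange 0 (PySem.Str.len low) 1).flatMap
        (fun i => pvLengths.map (fun L => (i, L)))).foldl
      (fun b x => match pvLookup low x.1 x.2 with | some p => if p < b then p else b | none => b) 7 with hbest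
    unfold pvLookup PySem.Dict.get? at hg
    obtain ⟨pair, hfind, hpair⟩ := Option.map_eq_some_iff.mp hg
    have hmem : pair ∈ pvTermPriority.items := List.mem_of_find?_eq_some hfind
    have hkey : pair.1 = PySem.Str.slice low (some i) (some (i + L)) := by
      have := List.find?_some hfind
      exact eq_of_beq this
    obtain ⟨hlt, hgrp⟩ := pvItems_facts pair hmem
    rw [hpair] at hlt hgrp
    refine ⟨hlt, ?_⟩
    apply List.any_eq_true.mpr
    refine ⟨pair.1, hgrp, ?_⟩
    -- pair.1 is the window slice, hence an infix of low
    rw [PySem.Str.isIn_iff_infix, hkey]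
    have : (PySem.Str.slice low (some i) (some (i + L))).toList
        = PySem.List.slice low.toList (some i) (some (i + L)) := by simp [pysem]
    rw [this]
    -- the slice is a take of a drop, hence an infix
    rw [PySem.List.slice_toNat _ _ _]
    · exact ((List.take_prefix _ _).isInfix).trans ((List.drop_suffix _ _).isInfix)
    · omega
    · omega

-- ===== VERDICT (by name: the statement is the Claim_ definition above) =====
theorem categorize_disease_py_spec : Claim_equal_categorize_disease_py := by
  intro s _
  unfold Spec_categorize_disease_py categorize_disease_py categorize_disease_py_alt
  set low := PySem.Str.lower s with hlow
  have e0 : (["diabetes", "thyroid", "hormone"].any (fun t => PySem.Str.isIn t low)) = pvCond low 0 := rfl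
  have e1 : (["heart", "cardio", "hypertension", "angina"].any (fun t => PySem.Str.isIn t low)) = pvCond low 1 := rfl
  have e2 : (["lung", "asthma", "pneumonia", "respiratory"].any (fun t => PySem.Str.isIn t low)) = pvCond low 2 := rfl
  have e3 : (["cancer", "tumor", "carcinoma", "leukemia"].any (fun t => PySem.Str.isIn t low)) = pvCond low 3 := rfl
  have e4 : (["infection", "bacterial", "viral", "fungal"].any (fun t => PySem.Str.isIn t low)) = pvCond low 4 := rfl
  have e5 : (["depression", "anxiety", "mental", "psychiatric"].any (fun t => PySem.Str.isIn t low)) = pvCond low 5 := rfl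
  have e6 : (["arthritis", "bone", "joint", "muscle"].any (fun t => PySem.Str.isIn t low)) = pvCond low 6 := rfl
  simp only [e0, e1, e2, e3, e4, e5, e6]
  have hmem := pvBest_mem low
  have hbound : ∀ p, p < 7 → pvCond low p = true → pvBestOf low ≤ p := pvBest_le low
  -- helper: if all conditions up to the chain point are false and one is true, best is pinned
  by_cases h0 : pvCond low 0 = true
  · have : pvBestOf low = 0 := Nat.le_zero.mp (hbound 0 (by omega) h0)
    simp [h0, this, pvCategories]
  · by_cases h1 : pvCond low 1 = true
    · have hle := hbound 1 (by omega) h1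
      have : pvBestOf low = 1 := by
        interval_cases h : pvBestOf low
        · rcases hmem with h7 | ⟨_, hc⟩; · omega
          exact absurd hc h0
        · rfl
      simp [h0, h1, this, pvCategories]
    · by_cases h2 : pvCond low 2 = true
      · have hle := hbound 2 (by omega) h2
        have : pvBestOf low = 2 := by
          interval_cases h : pvBestOf low
          · rcases hmem with h7 | ⟨_, hc⟩; · omega
            exact absurd hc h0
          · rcases hmem with h7 | ⟨_, hc⟩; · omega
            exact absurd hc h1
          · rfl
        simp [h0, h1, h2, this, pvCategories]
      · by_cases h3 : pvCond low 3 = true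
        · have hle := hbound 3 (by omega) h3
          have : pvBestOf low = 3 := by
            interval_cases h : pvBestOf low
            · rcases hmem with h7 | ⟨_, hc⟩; · omega
              exact absurd hc h0
            · rcases hmem with h7 | ⟨_, hc⟩; · omega
              exact absurd hc h1
            · rcases hmem with h7 | ⟨_, hc⟩; · omega
              exact absurd hc h2
            · rfl
          simp [h0, h1, h2, h3, this, pvCategories]
        · by_cases h4 : pvCond low 4 = true
          · have hle := hbound 4 (by omega) h4
            have : pvBestOf low = 4 := by
              interval_cases h : pvBestOf low
              · rcases hmem with h7 | ⟨_, hc⟩; · omega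
                exact absurd hc h0
              · rcases hmem with h7 | ⟨_, hc⟩; · omega
                exact absurd hc h1
              · rcases hmem with h7 | ⟨_, hc⟩; · omega
                exact absurd hc h2
              · rcases hmem with h7 | ⟨_, hc⟩; · omega
                exact absurd hc h3
              · rfl
            simp [h0, h1, h2, h3, h4, this, pvCategories]
          · by_cases h5 : pvCond low 5 = true
            · have hle := hbound 5 (by omega) h5
              have : pvBestOf low = 5 := by
                interval_cases h : pvBestOf low
                · rcases hmem with h7 | ⟨_, hc⟩; · omega
                  exact absurd hc h0
                · rcases hmem with h7 | ⟨_, hc⟩; · omega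
                  exact absurd hc h1
                · rcases hmem with h7 | ⟨_, hc⟩; · omega
                  exact absurd hc h2
                · rcases hmem with h7 | ⟨_, hc⟩; · omega
                  exact absurd hc h3
                · rcases hmem with h7 | ⟨_, hc⟩; · omega
                  exact absurd hc h4
                · rfl
              simp [h0, h1, h2, h3, h4, h5, this, pvCategories]
            · by_cases h6 : pvCond low 6 = true
              · have hle := hbound 6 (by omega) h6
                have : pvBestOf low = 6 := by
                  interval_cases h : pvBestOf low
                  · rcases hmem with h7 | ⟨_, hc⟩; · omega
                    exact absurd hc h0
                  · rcases hmem with h7 | ⟨_, hc⟩; · omega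
                    exact absurd hc h1
                  · rcases hmem with h7 | ⟨_, hc⟩; · omega
                    exact absurd hc h2
                  · rcases hmem with h7 | ⟨_, hc⟩; · omega
                    exact absurd hc h3
                  · rcases hmem with h7 | ⟨_, hc⟩; · omega
                    exact absurd hc h4
                  · rcases hmem with h7 | ⟨_, hc⟩; · omega
                    exact absurd hc h5
                  · rfl
                simp [h0, h1, h2, h3, h4, h5, h6, this, pvCategories]
              · have : pvBestOf low = 7 := by
                  rcases hmem with h7 | ⟨hlt, hc⟩
                  · exact h7
                  · exfalso
                    interval_cases h : pvBestOf low
                    · exact h0 hc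
                    · exact h1 hc
                    · exact h2 hc
                    · exact h3 hc
                    · exact h4 hc
                    · exact h5 hc
                    · exact h6 hc
                simp [h0, h1, h2, h3, h4, h5, h6, this, pvCategories]
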